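-- pv_equiv track=rewrite | github.com/dipeshsubedi/games_ai | snake.py | find_farthest_point
-- ===== SOURCE A (Python) =====
-- import itertools
--
-- def find_farthest_point(snake, grid_w, grid_h):
--     """Find the farthest point from the snake's head."""
--     head = snake[0]
--     max_distance = -1
--     best_position = None
--
--     for row, col in itertools.product(range(grid_h), range(grid_w)):
--         if (row, col) in snake:
--             continue  # Skip positions occupied by the snake
--
--         distance = abs(head[0] - row) + abs(head[1] - col)  # Manhattan distance
--         if distance > max_distance:
--             max_distance = distance
--             best_position = (row, col)
--
--     return best_position
-- ===== SOURCE B (Python) =====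
-- def find_farthest_point(snake, grid_w, grid_h):
--     """Find the farthest point from the snake's head.
--
--     Ring search: walk distances from the largest possible down to the smallest,
--     and inside each distance ring visit its (at most two) cells per row in
--     row-major order; the first free cell found is the farthest one, with the
--     same row-major tie-break as a full scan.
--     """
--     head_r, head_c = snake[0]
--     if grid_w <= 0 or grid_h <= 0:
--         return None
--     occupied = set(snake)
--     near_r = min(max(head_r, 0), grid_h - 1)
--     near_c = min(max(head_c, 0), grid_w - 1)
--     dmin = abs(head_r - near_r) + abs(head_c - near_c)
--     dmax = max(abs(head_r), abs(head_r - (grid_h - 1))) + \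
--            max(abs(head_c), abs(head_c - (grid_w - 1)))
--     for d in range(dmax, dmin - 1, -1):
--         for r in range(grid_h):
--             rc = d - abs(head_r - r)
--             if rc < 0:
--                 continue
--             for c in ((head_c - rc,) if rc == 0 else (head_c - rc, head_c + rc)):
--                 if 0 <= c < grid_w and (r, c) not in occupied:
--                     return (r, c)
--     return None
-- ===== Notes on version B (the rewrite author's own statement) =====
-- stated objective: faster
-- what changed: Replaces A's full row-major scan with a running max (and an O(S) list-membership test per cell) by a distance-ring search: B computes the farthest and nearest possible Manhattan distances from the head to the grid, walks distances downward, enumerates each ring's at most two candidate cells per row in row-major order against a set of occupied cells, and returns the first free cell it hits.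
-- outside the precondition, e.g. on find_farthest_point([], 5, 5): A raises IndexError, B raises IndexError
import Mathlib
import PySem

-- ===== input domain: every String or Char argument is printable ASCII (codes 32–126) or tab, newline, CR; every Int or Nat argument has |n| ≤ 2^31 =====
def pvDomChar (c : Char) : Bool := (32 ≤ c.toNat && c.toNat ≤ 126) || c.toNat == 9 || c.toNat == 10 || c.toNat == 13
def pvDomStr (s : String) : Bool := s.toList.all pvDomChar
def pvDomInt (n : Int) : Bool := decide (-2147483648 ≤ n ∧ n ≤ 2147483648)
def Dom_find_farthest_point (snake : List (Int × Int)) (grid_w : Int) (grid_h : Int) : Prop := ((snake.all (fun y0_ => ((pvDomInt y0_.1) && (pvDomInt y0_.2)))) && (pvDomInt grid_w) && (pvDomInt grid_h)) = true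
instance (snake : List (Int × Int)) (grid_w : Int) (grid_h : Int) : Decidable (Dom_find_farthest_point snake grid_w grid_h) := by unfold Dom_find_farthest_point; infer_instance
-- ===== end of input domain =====

-- B replaces A's full row-major running-max scan by a distance-ring search: it walks
-- distances from the largest possible down to the smallest and returns the first free
-- cell found, visiting each ring's (at most two) cells per row in row-major order.

-- ===== PORT A =====
def find_farthest_point (snake : List (Int × Int)) (grid_w : Int) (grid_h : Int) : Option (Int × Int) :=
  match PySem.List.pyGet? snake 0 with
  | none => none   -- snake[0] raises IndexError: excluded by Pre_
  | some head =>
    let cells := (PySem.List.pyRange 0 grid_h 1).flatMap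
      (fun row => (PySem.List.pyRange 0 grid_w 1).map (fun col => (row, col)))
    (cells.foldl
      (fun s p =>
        if p ∈ snake then s            -- continue: skip positions occupied by the snake
        else
          let distance : Int := |head.1 - p.1| + |head.2 - p.2|
          if distance > s.1 then (distance, some p) else s)
      ((-1 : Int), (none : Option (Int × Int)))).2

-- ===== PORT B =====
def find_farthest_point_alt (snake : List (Int × Int)) (grid_w : Int) (grid_h : Int) : Option (Int × Int) :=
  match PySem.List.pyGet? snake 0 with
  | none => none   -- snake[0] raises IndexError: excluded by Pre_
  | some head =>
    if grid_w ≤ 0 ∨ grid_h ≤ 0 then none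
    else
      let occupied := PySem.Set.ofList snake
      let near_r := min (max head.1 0) (grid_h - 1)
      let near_c := min (max head.2 0) (grid_w - 1)
      let dmin := |head.1 - near_r| + |head.2 - near_c|
      let dmax := max |head.1| |head.1 - (grid_h - 1)| + max |head.2| |head.2 - (grid_w - 1)|
      (PySem.List.pyRange dmax (dmin - 1) (-1)).findSome? (fun d =>
        (PySem.List.pyRange 0 grid_h 1).findSome? (fun r =>
          let rc := d - |head.1 - r|
          if rc < 0 then none              -- continue: ring misses this row
          else
            ((if rc = 0 then [head.2 - rc] else [head.2 - rc, head.2 + rc]).find?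
              (fun c => decide (0 ≤ c ∧ c < grid_w) && !(decide ((r, c) ∈ occupied)))).map
              (fun c => (r, c))))

-- ===== PRECONDITION & SPEC =====
-- Pre_ excludes only the empty snake, on which both A and B raise IndexError at snake[0].
def Pre_find_farthest_point (snake : List (Int × Int)) (grid_w : Int) (grid_h : Int) : Prop := snake ≠ []
instance (snake : List (Int × Int)) (grid_w : Int) (grid_h : Int) : Decidable (Pre_find_farthest_point snake grid_w grid_h) := by unfold Pre_find_farthest_point; infer_instance
def pvWitness_find_farthest_point : (List (Int × Int)) × Int × Int := ([((0 : Int), (0 : Int))], 3, 3)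

def Spec_find_farthest_point (snake : List (Int × Int)) (grid_w : Int) (grid_h : Int) (out : Option (Int × Int)) : Prop := out = find_farthest_point_alt snake grid_w grid_h
instance (snake : List (Int × Int)) (grid_w : Int) (grid_h : Int) (out : Option (Int × Int)) : Decidable (Spec_find_farthest_point snake grid_w grid_h out) := by unfold Spec_find_farthest_point; infer_instance

-- ===== CLAIM (what is proved, stated in full; the proofs are below) =====
def Claim_equal_find_farthest_point : Prop := ∀ (snake : List (Int × Int)) (grid_w : Int) (grid_h : Int), Dom_find_farthest_point snake grid_w grid_h → Pre_find_farthest_point snake grid_w grid_h → Spec_find_farthest_point snake grid_w grid_h (find_farthest_point snake grid_w grid_h)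

-- ===== LEMMAS AND PROOFS =====

-- Manhattan distance from the head, and the free-cell list in row-major order.
def pvKey (head p : Int × Int) : Int := |head.1 - p.1| + |head.2 - p.2|
def pvFree (snake : List (Int × Int)) (p : Int × Int) : Bool := decide (p ∉ snake)
def pvCells (grid_w grid_h : Int) : List (Int × Int) :=
  (PySem.List.pyRange 0 grid_h 1).flatMap
    (fun r => (PySem.List.pyRange 0 grid_w 1).map (fun c => (r, c)))
def pvFreeCells (snake : List (Int × Int)) (grid_w grid_h : Int) : List (Int × Int) :=
  (pvCells grid_w grid_h).filter (pvFree snake)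
-- the canonical "first maximal element" fold both sides are reduced to
def pvFold (head : Int × Int) (F : List (Int × Int)) : Option (Int × Int) :=
  F.foldl (fun acc x => match acc with
    | none => some x
    | some m => if pvKey head m < pvKey head x then some x else some m) none

-- A fold that skips elements failing q equals the fold over the filtered list.
theorem pv_foldl_skip {α σ : Type} (xs : List α) (q : α → Bool) (f : σ → α → σ) (s : σ) :
    xs.foldl (fun s x => if q x then f s x else s) s = (xs.filter q).foldl f s := by
  induction xs generalizing s with
  | nil => rfl
  | cons x t ih =>
    simp only [List.foldl_cons, List.filter_cons]
    by_cases h : q x <;> simp [h, ih]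

-- A's running strict-> max loop computes the first-maximal fold,
-- provided the key is everywhere above the initial -1 and the state is coherent.
theorem pv_foldl_max_inv {α : Type} (key : α → Int) (xs : List α)
    (hkey : ∀ x, 0 ≤ key x) (s : Int × Option α)
    (hs : match s.2 with | none => s.1 = -1 | some m => s.1 = key m) :
    (xs.foldl (fun s p =>
        let d := key p
        if d > s.1 then (d, some p) else s) s).2
      = xs.foldl (fun acc x =>
          match acc with
          | none => some x
          | some m => if key m < key x then some x else some m) s.2 := by
  induction xs generalizing s with
  | nil => rfl
  | cons p t ih =>
    simp only [List.foldl_cons]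
    match hs2 : s.2 with
    | none =>
      have h1 : s.1 = -1 := by simpa [hs2] using hs
      have hgt : key p > s.1 := by have := hkey p; omega
      simpa [hgt] using ih (key p, some p) (by simp)
    | some m =>
      have h1 : s.1 = key m := by simpa [hs2] using hs
      by_cases hc : key m < key p
      · have : key p > s.1 := by omega
        simpa [this, hc] using ih (key p, some p) (by simp)
      · have hng : ¬ key p > s.1 := by omega
        rw [if_neg hng]
        have hm : (match some m with
            | none => some p
            | some m => if key m < key p then some p else some m) = s.2 := by
          simp [hc, hs2]
        rw [hm]
        exact ih s hs

-- once the accumulator holds a maximal element, the fold never moves off it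
theorem pv_fold_stay (head m : Int × Int) (t : List (Int × Int))
    (h : ∀ p ∈ t, pvKey head p ≤ pvKey head m) :
    t.foldl (fun acc x => match acc with
      | none => some x
      | some m => if pvKey head m < pvKey head x then some x else some m) (some m) = some m := by
  induction t with
  | nil => rfl
  | cons y s ih =>
    have hy : pvKey head y ≤ pvKey head m := h y (by simp)
    simp only [List.foldl_cons, if_neg (by omega : ¬ pvKey head m < pvKey head y)]
    exact ih (fun p hp => h p (by simp [hp]))

-- from any strictly sub-maximal state, the fold lands on the first element of key hi
theorem pv_fold_from (head : Int × Int) (hi : Int) :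
    ∀ (t : List (Int × Int)) (x m : Int × Int), pvKey head x < hi →
    (∀ p ∈ t, pvKey head p ≤ hi) →
    t.find? (fun p => decide (pvKey head p = hi)) = some m →
    t.foldl (fun acc x => match acc with
      | none => some x
      | some m => if pvKey head m < pvKey head x then some x else some m) (some x) = some m := by
  intro t
  induction t with
  | nil => intro x m _ _ hf; simp at hf
  | cons y s ih =>
    intro x m hx hb hf
    by_cases hy : pvKey head y = hi
    · rw [List.find?_cons] at hf
      have hf' : y = m := by simpa [hy] using hf
      subst hf'
      simp only [List.foldl_cons, if_pos (by omega : pvKey head x < pvKey head y)]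
      exact pv_fold_stay head y s (fun p hp => by have := hb p (by simp [hp]); omega)
    · rw [List.find?_cons] at hf
      simp only [hy, decide_false] at hf
      have hylt : pvKey head y < hi := by
        have := hb y (by simp); omega
      simp only [List.foldl_cons]
      by_cases hc : pvKey head x < pvKey head y
      · rw [if_pos hc]; exact ih y m hylt (fun p hp => hb p (by simp [hp])) hf
      · rw [if_neg hc]; exact ih x m hx (fun p hp => hb p (by simp [hp])) hf

-- the first-maximal fold returns exactly the first element attaining the maximum
theorem pv_fold_firstmax (head : Int × Int) (hi : Int) (F : List (Int × Int)) (m : Int × Int)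
    (hb : ∀ p ∈ F, pvKey head p ≤ hi)
    (hf : F.find? (fun p => decide (pvKey head p = hi)) = some m) :
    pvFold head F = some m := by
  match F with
  | [] => simp at hf
  | x :: t =>
    unfold pvFold
    simp only [List.foldl_cons]
    by_cases hx : pvKey head x = hi
    · rw [List.find?_cons] at hf
      have hf' : x = m := by simpa [hx] using hf
      subst hf'
      exact pv_fold_stay head x t (fun p hp => by have := hb p (by simp [hp]); omega)
    · rw [List.find?_cons] at hf
      simp only [hx, decide_false] at hf
      have hxlt : pvKey head x < hi := by have := hb x (by simp); omega
      exact pv_fold_from head hi t x m hxlt (fun p hp => hb p (by simp [hp])) hf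

-- descending-distance search over [lo..hi] equals the first-maximal fold
theorem pv_desc (head : Int × Int) (lo : Int) :
    ∀ (n : Nat) (hi : Int), (hi - (lo - 1)).toNat = n →
    ∀ (F : List (Int × Int)),
    (∀ p ∈ F, lo ≤ pvKey head p) → (∀ p ∈ F, pvKey head p ≤ hi) →
    (PySem.List.pyRange hi (lo - 1) (-1)).findSome?
      (fun d => (F.filter (fun p => decide (pvKey head p = d))).head?)
      = pvFold head F := by
  intro n
  induction n with
  | zero =>
    intro hi hn F hlo hhi
    have hle : hi ≤ lo - 1 := by omega
    rw [PySem.List.pyRange_neg_one_eq_nil hle]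
    match F with
    | [] => rfl
    | p :: t =>
      have h1 := hlo p (by simp)
      have h2 := hhi p (by simp)
      omega
  | succ k ih =>
    intro hi hn F hlo hhi
    have hlt : lo - 1 < hi := by omega
    rw [PySem.List.pyRange_neg_one_cons hlt, List.findSome?_cons]
    rw [List.head?_filter]
    match hf : F.find? (fun p => decide (pvKey head p = hi)) with
    | some m => exact (pv_fold_firstmax head hi F m hhi hf).symm
    | none =>
      have hnone : ∀ p ∈ F, pvKey head p ≠ hi := by
        intro p hp
        have := List.find?_eq_none.mp hf p hp
        simpa using this
      exact ih (hi - 1) (by omega) F hlo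
        (fun p hp => by have := hhi p hp; have := hnone p hp; omega)

-- pyRange 0 w 1 as a mapped Nat range (for the filter lemmas below)
theorem pv_range_cast (w : Int) :
    PySem.List.pyRange 0 w 1 = (List.range w.toNat).map (fun (k : Nat) => (k : Int)) := by
  rw [PySem.List.pyRange_one]
  simp

-- filtering an ascending range for one target value
theorem pv_filter_range_single (n : Nat) (a : Int) (f : Int → Bool) :
    ((List.range n).map (fun (k : Nat) => (k : Int))).filter (fun c => decide (c = a) && f c)
      = if 0 ≤ a ∧ a < (n : Int) ∧ f a = true then [a] else [] := by
  induction n with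
  | zero =>
    rw [if_neg (by rintro ⟨h1, h2, _⟩; omega)]
    simp
  | succ k ih =>
    rw [List.range_succ, List.map_append, List.filter_append, ih]
    simp only [List.map_cons, List.map_nil, List.filter_cons, List.filter_nil]
    by_cases ha : ((k : Int) = a)
    · subst ha
      have h1 : ¬ (0 ≤ (k : Int) ∧ (k : Int) < (k : Int) ∧ f (k : Int) = true) := by
        rintro ⟨_, h, _⟩; omega
      rw [if_neg h1]
      by_cases hf : f (k : Int) = true
      · have hc2 : 0 ≤ (k : Int) ∧ (k : Int) < ((k + 1 : Nat) : Int) ∧ f (k : Int) = true :=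
          ⟨by omega, by push_cast; omega, hf⟩
        rw [if_pos hc2]
        simp [hf]
      · have h2 : ¬ (0 ≤ (k : Int) ∧ (k : Int) < ((k + 1 : Nat) : Int) ∧ f (k : Int) = true) := by
          rintro ⟨_, _, h⟩; exact hf h
        rw [if_neg h2]
        simp [Bool.eq_false_iff.mpr hf]
    · have he : (decide ((k : Int) = a) && f (k : Int)) = false := by simp [ha]
      rw [he]
      have hiff : (0 ≤ a ∧ a < (k : Int) ∧ f a = true) ↔ (0 ≤ a ∧ a < ((k + 1 : Nat) : Int) ∧ f a = true) := by
        constructor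
        · rintro ⟨x1, x2, x3⟩; exact ⟨x1, by push_cast; omega, x3⟩
        · rintro ⟨x1, x2, x3⟩
          refine ⟨x1, ?_, x3⟩
          push_cast at x2
          rcases lt_or_eq_of_le (by omega : a ≤ (k : Int)) with h | h
          · exact h
          · exact absurd h.symm ha
      by_cases hc : 0 ≤ a ∧ a < (k : Int) ∧ f a = true
      · rw [if_pos hc, if_pos (hiff.mp hc)]; simp
      · rw [if_neg hc, if_neg (fun h => hc (hiff.mpr h))]; simp

-- filtering an ascending range for two target values a < b
theorem pv_filter_range_pair (n : Nat) (a b : Int) (hab : a < b) (f : Int → Bool) :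
    ((List.range n).map (fun (k : Nat) => (k : Int))).filter
        (fun c => (decide (c = a) || decide (c = b)) && f c)
      = (if 0 ≤ a ∧ a < (n : Int) ∧ f a = true then [a] else [])
          ++ (if 0 ≤ b ∧ b < (n : Int) ∧ f b = true then [b] else []) := by
  induction n with
  | zero =>
    rw [if_neg (by rintro ⟨h1, h2, _⟩; omega), if_neg (by rintro ⟨h1, h2, _⟩; omega)]
    simp
  | succ k ih =>
    rw [List.range_succ, List.map_append, List.filter_append, ih]
    simp only [List.map_cons, List.map_nil, List.filter_cons, List.filter_nil]
    by_cases hbk : ((k : Int) = b)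
    · subst hbk
      -- last element is b; a < b = k so a-conditions agree between k and k+1
      have haiff : (0 ≤ a ∧ a < (k : Int) ∧ f a = true) ↔ (0 ≤ a ∧ a < ((k + 1 : Nat) : Int) ∧ f a = true) := by
        constructor
        · rintro ⟨x1, x2, x3⟩; exact ⟨x1, by push_cast; omega, x3⟩
        · rintro ⟨x1, x2, x3⟩; exact ⟨x1, by omega, x3⟩
      have hb1 : ¬ (0 ≤ (k : Int) ∧ (k : Int) < (k : Int) ∧ f (k : Int) = true) := by
        rintro ⟨_, h, _⟩; omega
      rw [if_neg hb1]
      by_cases hf : f (k : Int) = true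
      · have he2 : ((decide ((k : Int) = a) || decide ((k : Int) = (k : Int))) && f (k : Int)) = true := by
          simp [hf]
        rw [he2]
        have hc2 : 0 ≤ (k : Int) ∧ (k : Int) < ((k + 1 : Nat) : Int) ∧ f (k : Int) = true :=
          ⟨by omega, by push_cast; omega, hf⟩
        rw [if_pos hc2]
        by_cases hc : 0 ≤ a ∧ a < (k : Int) ∧ f a = true
        · rw [if_pos hc, if_pos (haiff.mp hc)]; simp
        · rw [if_neg hc, if_neg (fun h => hc (haiff.mpr h))]; simp
      · have he2 : ((decide ((k : Int) = a) || decide ((k : Int) = (k : Int))) && f (k : Int)) = false := by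
          simp [Bool.eq_false_iff.mpr hf]
        rw [he2]
        have h2 : ¬ (0 ≤ (k : Int) ∧ (k : Int) < ((k + 1 : Nat) : Int) ∧ f (k : Int) = true) := by
          rintro ⟨_, _, h⟩; exact hf h
        rw [if_neg h2]
        by_cases hc : 0 ≤ a ∧ a < (k : Int) ∧ f a = true
        · rw [if_pos hc, if_pos (haiff.mp hc)]; simp
        · rw [if_neg hc, if_neg (fun h => hc (haiff.mpr h))]; simp
    · by_cases hak : ((k : Int) = a)
      · subst hak
        -- last element is a; b > a = k so b-conditions are false at both k and k+1
        have ha1 : ¬ (0 ≤ (k : Int) ∧ (k : Int) < (k : Int) ∧ f (k : Int) = true) := by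
          rintro ⟨_, h, _⟩; omega
        have hb1 : ¬ (0 ≤ b ∧ b < (k : Int) ∧ f b = true) := by rintro ⟨_, h, _⟩; omega
        have hb2 : ¬ (0 ≤ b ∧ b < ((k + 1 : Nat) : Int) ∧ f b = true) := by
          rintro ⟨_, h, _⟩; push_cast at h; omega
        rw [if_neg ha1, if_neg hb1, if_neg hb2]
        by_cases hf : f (k : Int) = true
        · have he2 : ((decide ((k : Int) = (k : Int)) || decide ((k : Int) = b)) && f (k : Int)) = true := by
            simp [hf]
          rw [he2]
          have hc2 : 0 ≤ (k : Int) ∧ (k : Int) < ((k + 1 : Nat) : Int) ∧ f (k : Int) = true :=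
            ⟨by omega, by push_cast; omega, hf⟩
          rw [if_pos hc2]
          simp
        · have he2 : ((decide ((k : Int) = (k : Int)) || decide ((k : Int) = b)) && f (k : Int)) = false := by
            simp [Bool.eq_false_iff.mpr hf]
          rw [he2]
          have h2 : ¬ (0 ≤ (k : Int) ∧ (k : Int) < ((k + 1 : Nat) : Int) ∧ f (k : Int) = true) := by
            rintro ⟨_, _, h⟩; exact hf h
          rw [if_neg h2]
          simp
      · have he : ((decide ((k : Int) = a) || decide ((k : Int) = b)) && f (k : Int)) = false := by
          simp [hak, hbk]
        rw [he]
        have e1 : (0 ≤ a ∧ a < (k : Int) ∧ f a = true) ↔ (0 ≤ a ∧ a < ((k + 1 : Nat) : Int) ∧ f a = true) := by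
          constructor
          · rintro ⟨x1, x2, x3⟩; exact ⟨x1, by push_cast; omega, x3⟩
          · rintro ⟨x1, x2, x3⟩
            refine ⟨x1, ?_, x3⟩
            push_cast at x2
            rcases lt_or_eq_of_le (by omega : a ≤ (k : Int)) with h | h
            · exact h
            · exact absurd h.symm hak
        have e2 : (0 ≤ b ∧ b < (k : Int) ∧ f b = true) ↔ (0 ≤ b ∧ b < ((k + 1 : Nat) : Int) ∧ f b = true) := by
          constructor
          · rintro ⟨x1, x2, x3⟩; exact ⟨x1, by push_cast; omega, x3⟩
          · rintro ⟨x1, x2, x3⟩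
            refine ⟨x1, ?_, x3⟩
            push_cast at x2
            rcases lt_or_eq_of_le (by omega : b ≤ (k : Int)) with h | h
            · exact h
            · exact absurd h.symm hbk
        by_cases hc1 : 0 ≤ a ∧ a < (k : Int) ∧ f a = true
        · rw [if_pos hc1, if_pos (e1.mp hc1)]
          by_cases hc2 : 0 ≤ b ∧ b < (k : Int) ∧ f b = true
          · rw [if_pos hc2, if_pos (e2.mp hc2)]; simp
          · rw [if_neg hc2, if_neg (fun h => hc2 (e2.mpr h))]; simp
        · rw [if_neg hc1, if_neg (fun h => hc1 (e1.mpr h))]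
          by_cases hc2 : 0 ≤ b ∧ b < (k : Int) ∧ f b = true
          · rw [if_pos hc2, if_pos (e2.mp hc2)]; simp
          · rw [if_neg hc2, if_neg (fun h => hc2 (e2.mpr h))]; simp

-- one row of the ring at distance d: the row-major free cells at that distance
theorem pv_row (snake : List (Int × Int)) (head : Int × Int) (grid_w d r : Int) :
    ((PySem.List.pyRange 0 grid_w 1).filter
        (fun c => pvFree snake (r, c) && decide (pvKey head (r, c) = d))).head?
      = (if d - |head.1 - r| < 0 then none
         else (if d - |head.1 - r| = 0 then [head.2 - (d - |head.1 - r|)]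
               else [head.2 - (d - |head.1 - r|), head.2 + (d - |head.1 - r|)]).find?
                (fun c => decide (0 ≤ c ∧ c < grid_w) && pvFree snake (r, c))) := by
  set rc := d - |head.1 - r| with hrc
  have hkey : ∀ c : Int, (pvKey head (r, c) = d) ↔ (|head.2 - c| = rc) := by
    intro c
    show |head.1 - r| + |head.2 - c| = d ↔ _
    constructor <;> (intro h; omega)
  -- the decide-and-free test on a single candidate column, as explicit booleans
  have hbtrue : ∀ x : Int, (0 ≤ x ∧ x < grid_w) → pvFree snake (r, x) = true →
      (decide (0 ≤ x ∧ x < grid_w) && pvFree snake (r, x)) = true := by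
    intro x hx hfx
    rw [decide_eq_true hx, hfx]
    rfl
  have hbfalse1 : ∀ x : Int, ¬ (0 ≤ x ∧ x < grid_w) →
      (decide (0 ≤ x ∧ x < grid_w) && pvFree snake (r, x)) = false := by
    intro x hx
    rw [decide_eq_false hx, Bool.false_and]
  have hbfalse2 : ∀ x : Int, ¬ (pvFree snake (r, x) = true) →
      (decide (0 ≤ x ∧ x < grid_w) && pvFree snake (r, x)) = false := by
    intro x hfx
    rw [Bool.eq_false_iff.mpr hfx, Bool.and_false]
  by_cases h0 : rc < 0
  · rw [if_pos h0]
    have hnil : (PySem.List.pyRange 0 grid_w 1).filter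
        (fun c => pvFree snake (r, c) && decide (pvKey head (r, c) = d)) = [] := by
      rw [List.filter_eq_nil_iff]
      intro c _
      have habs := abs_nonneg (head.2 - c)
      simp [hkey c]
      intro _ h
      omega
    rw [hnil]; rfl
  · rw [if_neg h0]
    by_cases hz : rc = 0
    · rw [if_pos hz]
      have hpred : ∀ c ∈ PySem.List.pyRange 0 grid_w 1,
          (pvFree snake (r, c) && decide (pvKey head (r, c) = d))
            = (decide (c = head.2 - rc) && pvFree snake (r, c)) := by
        intro c _
        rw [Bool.and_comm]
        congr 1
        simp only [decide_eq_decide, hkey c]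
        constructor
        · intro h; rcases abs_cases (head.2 - c) with ⟨h1, h2⟩ | ⟨h1, h2⟩ <;> omega
        · intro h; rcases abs_cases (head.2 - c) with ⟨h1, h2⟩ | ⟨h1, h2⟩ <;> omega
      rw [List.filter_congr hpred, pv_range_cast, pv_filter_range_single]
      by_cases hc : 0 ≤ head.2 - rc ∧ head.2 - rc < grid_w
      · by_cases hf : pvFree snake (r, head.2 - rc) = true
        · have hcc : 0 ≤ head.2 - rc ∧ head.2 - rc < ((grid_w.toNat : Nat) : Int) ∧ pvFree snake (r, head.2 - rc) = true :=
            ⟨hc.1, by omega, hf⟩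
          rw [if_pos hcc]
          simp only [List.find?_cons, hbtrue _ hc hf, List.head?_cons]
        · have hcc : ¬ (0 ≤ head.2 - rc ∧ head.2 - rc < ((grid_w.toNat : Nat) : Int) ∧ pvFree snake (r, head.2 - rc) = true) := by
            rintro ⟨_, _, h⟩; exact hf h
          rw [if_neg hcc]
          simp only [List.find?_cons, List.find?_nil, hbfalse2 _ hf, List.head?_nil]
      · have hcc : ¬ (0 ≤ head.2 - rc ∧ head.2 - rc < ((grid_w.toNat : Nat) : Int) ∧ pvFree snake (r, head.2 - rc) = true) := by
          rintro ⟨h1, h2, _⟩; exact hc ⟨h1, by omega⟩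
        rw [if_neg hcc]
        simp only [List.find?_cons, List.find?_nil, hbfalse1 _ hc, List.head?_nil]
    · rw [if_neg hz]
      have hpred : ∀ c ∈ PySem.List.pyRange 0 grid_w 1,
          (pvFree snake (r, c) && decide (pvKey head (r, c) = d))
            = ((decide (c = head.2 - rc) || decide (c = head.2 + rc)) && pvFree snake (r, c)) := by
        intro c _
        rw [Bool.and_comm]
        congr 1
        simp only [← Bool.decide_or, decide_eq_decide, hkey c]
        constructor
        · intro h; rcases abs_cases (head.2 - c) with ⟨h1, h2⟩ | ⟨h1, h2⟩ <;> omega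
        · intro h; rcases abs_cases (head.2 - c) with ⟨h1, h2⟩ | ⟨h1, h2⟩ <;> omega
      rw [List.filter_congr hpred, pv_range_cast,
        pv_filter_range_pair _ _ _ (by omega : head.2 - rc < head.2 + rc)]
      by_cases hc1 : 0 ≤ head.2 - rc ∧ head.2 - rc < grid_w
      · by_cases hf1 : pvFree snake (r, head.2 - rc) = true
        · have hcc : 0 ≤ head.2 - rc ∧ head.2 - rc < ((grid_w.toNat : Nat) : Int) ∧ pvFree snake (r, head.2 - rc) = true :=
            ⟨hc1.1, by omega, hf1⟩
          rw [if_pos hcc]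
          simp only [List.find?_cons, hbtrue _ hc1 hf1, List.head?_append, List.head?_cons,
            Option.some_or]
        · have hcc : ¬ (0 ≤ head.2 - rc ∧ head.2 - rc < ((grid_w.toNat : Nat) : Int) ∧ pvFree snake (r, head.2 - rc) = true) := by
            rintro ⟨_, _, h⟩; exact hf1 h
          rw [if_neg hcc]
          by_cases hc2 : 0 ≤ head.2 + rc ∧ head.2 + rc < grid_w
          · by_cases hf2 : pvFree snake (r, head.2 + rc) = true
            · have hcc2 : 0 ≤ head.2 + rc ∧ head.2 + rc < ((grid_w.toNat : Nat) : Int) ∧ pvFree snake (r, head.2 + rc) = true :=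
                ⟨hc2.1, by omega, hf2⟩
              rw [if_pos hcc2]
              simp only [List.find?_cons, hbfalse2 _ hf1, hbtrue _ hc2 hf2, List.nil_append,
                List.head?_cons]
            · have hcc2 : ¬ (0 ≤ head.2 + rc ∧ head.2 + rc < ((grid_w.toNat : Nat) : Int) ∧ pvFree snake (r, head.2 + rc) = true) := by
                rintro ⟨_, _, h⟩; exact hf2 h
              rw [if_neg hcc2]
              simp only [List.find?_cons, List.find?_nil, hbfalse2 _ hf1, hbfalse2 _ hf2,
                List.nil_append, List.head?_nil]
          · have hcc2 : ¬ (0 ≤ head.2 + rc ∧ head.2 + rc < ((grid_w.toNat : Nat) : Int) ∧ pvFree snake (r, head.2 + rc) = true) := by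
              rintro ⟨h1, h2, _⟩; exact hc2 ⟨h1, by omega⟩
            rw [if_neg hcc2]
            simp only [List.find?_cons, List.find?_nil, hbfalse2 _ hf1, hbfalse1 _ hc2,
              List.nil_append, List.head?_nil]
      · have hcc : ¬ (0 ≤ head.2 - rc ∧ head.2 - rc < ((grid_w.toNat : Nat) : Int) ∧ pvFree snake (r, head.2 - rc) = true) := by
          rintro ⟨h1, h2, _⟩; exact hc1 ⟨h1, by omega⟩
        rw [if_neg hcc]
        by_cases hc2 : 0 ≤ head.2 + rc ∧ head.2 + rc < grid_w
        · by_cases hf2 : pvFree snake (r, head.2 + rc) = true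
          · have hcc2 : 0 ≤ head.2 + rc ∧ head.2 + rc < ((grid_w.toNat : Nat) : Int) ∧ pvFree snake (r, head.2 + rc) = true :=
              ⟨hc2.1, by omega, hf2⟩
            rw [if_pos hcc2]
            simp only [List.find?_cons, hbfalse1 _ hc1, hbtrue _ hc2 hf2, List.nil_append,
              List.head?_cons]
          · have hcc2 : ¬ (0 ≤ head.2 + rc ∧ head.2 + rc < ((grid_w.toNat : Nat) : Int) ∧ pvFree snake (r, head.2 + rc) = true) := by
              rintro ⟨_, _, h⟩; exact hf2 h
            rw [if_neg hcc2]
            simp only [List.find?_cons, List.find?_nil, hbfalse1 _ hc1, hbfalse2 _ hf2,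
              List.nil_append, List.head?_nil]
        · have hcc2 : ¬ (0 ≤ head.2 + rc ∧ head.2 + rc < ((grid_w.toNat : Nat) : Int) ∧ pvFree snake (r, head.2 + rc) = true) := by
            rintro ⟨h1, h2, _⟩; exact hc2 ⟨h1, by omega⟩
          rw [if_neg hcc2]
          simp only [List.find?_cons, List.find?_nil, hbfalse1 _ hc1, hbfalse1 _ hc2,
            List.nil_append, List.head?_nil]

-- one full ring at distance d: first free cell of distance d in row-major order
theorem pv_ring (snake : List (Int × Int)) (head : Int × Int) (grid_w grid_h d : Int) :
    ((pvFreeCells snake grid_w grid_h).filter (fun p => decide (pvKey head p = d))).head?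
      = (PySem.List.pyRange 0 grid_h 1).findSome? (fun r =>
          let rc := d - |head.1 - r|
          if rc < 0 then none
          else ((if rc = 0 then [head.2 - rc] else [head.2 - rc, head.2 + rc]).find?
              (fun c => decide (0 ≤ c ∧ c < grid_w) && pvFree snake (r, c))).map
              (fun c => (r, c))) := by
  unfold pvFreeCells pvCells
  rw [List.filter_filter, List.filter_flatMap, List.head?_flatMap]
  congr 1
  funext r
  rw [show (fun (c : Int) => (r, c)) = ((fun c => (r, c)) : Int → Int × Int) from rfl,
    List.filter_map, List.head?_map]
  have : ((PySem.List.pyRange 0 grid_w 1).filter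
      ((fun p => decide (pvKey head p = d) && pvFree snake p) ∘ (fun c => (r, c)))).head?
      = ((PySem.List.pyRange 0 grid_w 1).filter
        (fun c => pvFree snake (r, c) && decide (pvKey head (r, c) = d))).head? := by
    congr 1
    apply List.filter_congr
    intro c _
    simp [Function.comp, Bool.and_comm]
  rw [this, pv_row]
  by_cases h0 : d - |head.1 - r| < 0
  · simp only [if_pos h0]
    try rfl
  · simp only [if_neg h0]
    try rfl

-- one coordinate's contribution to the distance bounds
theorem pv_coord (x r H : Int) (h1 : 0 ≤ r) (h2 : r < H) :
    |x - min (max x 0) (H - 1)| ≤ |x - r| ∧ |x - r| ≤ max |x| |x - (H - 1)| := by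
  rcases abs_cases (x - r) with ⟨e1, e2⟩ | ⟨e1, e2⟩ <;>
    rcases abs_cases (x - min (max x 0) (H - 1)) with ⟨f1, f2⟩ | ⟨f1, f2⟩ <;>
      rcases abs_cases x with ⟨g1, g2⟩ | ⟨g1, g2⟩ <;>
        rcases abs_cases (x - (H - 1)) with ⟨k1, k2⟩ | ⟨k1, k2⟩ <;>
          rw [e1, f1, g1, k1] <;> constructor <;> omega

-- every free cell's distance lies between the ring-search bounds
theorem pv_bounds (snake : List (Int × Int)) (head : Int × Int) (grid_w grid_h : Int)
    (p : Int × Int) (hp : p ∈ pvFreeCells snake grid_w grid_h) :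
    (|head.1 - min (max head.1 0) (grid_h - 1)| + |head.2 - min (max head.2 0) (grid_w - 1)|
        ≤ pvKey head p)
    ∧ (pvKey head p ≤ max |head.1| |head.1 - (grid_h - 1)| + max |head.2| |head.2 - (grid_w - 1)|) := by
  unfold pvFreeCells pvCells at hp
  rw [List.mem_filter] at hp
  obtain ⟨hmem, _⟩ := hp
  rw [List.mem_flatMap] at hmem
  obtain ⟨r, hr, hmap⟩ := hmem
  rw [List.mem_map] at hmap
  obtain ⟨c, hcc, hpc⟩ := hmap
  rw [PySem.List.mem_pyRange_one] at hr hcc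
  subst hpc
  have c1 := pv_coord head.1 r grid_h hr.1 hr.2
  have c2 := pv_coord head.2 c grid_w hcc.1 hcc.2
  have hkk : pvKey head (r, c) = |head.1 - r| + |head.2 - c| := rfl
  rw [hkk]
  constructor
  · have := add_le_add c1.1 c2.1
    omega
  · have := add_le_add c1.2 c2.2
    omega

-- with empty grid dimensions the cell list is empty
theorem pv_cells_nil (grid_w grid_h : Int) (h : grid_w ≤ 0 ∨ grid_h ≤ 0) :
    pvCells grid_w grid_h = [] := by
  unfold pvCells
  rcases h with hw | hh
  · rw [PySem.List.pyRange_one_eq_nil hw]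
    simp
  · rw [PySem.List.pyRange_one_eq_nil hh]
    simp

-- A reduces to the first-maximal fold over the free cells
theorem pv_A_eq (snake : List (Int × Int)) (grid_w grid_h : Int) (head : Int × Int)
    (hh : PySem.List.pyGet? snake 0 = some head) :
    find_farthest_point snake grid_w grid_h = pvFold head (pvFreeCells snake grid_w grid_h) := by
  unfold find_farthest_point
  rw [hh]
  simp only
  have hstep : (fun (s : Int × Option (Int × Int)) (p : Int × Int) =>
        if p ∈ snake then s
        else if |head.1 - p.1| + |head.2 - p.2| > s.1 then (|head.1 - p.1| + |head.2 - p.2|, some p) else s)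
      = (fun s p => if pvFree snake p then
          (fun (s : Int × Option (Int × Int)) p =>
            let d := pvKey head p
            if d > s.1 then (d, some p) else s) s p else s) := by
    funext s p
    by_cases hp : p ∈ snake <;> simp [hp, pvFree, pvKey]
  rw [hstep, pv_foldl_skip, pv_foldl_max_inv (pvKey head) _
    (fun x => by unfold pvKey; positivity) _ (by simp)]
  unfold pvFold pvFreeCells pvCells
  show List.foldl _ ((-1 : Int), (none : Option (Int × Int))).2 _ = List.foldl _ none _
  congr 1
  funext acc x
  cases acc <;> rfl

-- B reduces to the same fold (nondegenerate grid)
theorem pv_B_eq (snake : List (Int × Int)) (grid_w grid_h : Int) (head : Int × Int)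
    (hh : PySem.List.pyGet? snake 0 = some head) (hwh : ¬ (grid_w ≤ 0 ∨ grid_h ≤ 0)) :
    find_farthest_point_alt snake grid_w grid_h = pvFold head (pvFreeCells snake grid_w grid_h) := by
  unfold find_farthest_point_alt
  rw [hh]
  simp only [if_neg hwh]
  have hocc : ∀ (r c : Int), (decide (0 ≤ c ∧ c < grid_w) && !(decide ((r, c) ∈ PySem.Set.ofList snake)))
      = (decide (0 ≤ c ∧ c < grid_w) && pvFree snake (r, c)) := by
    intro r c
    congr 1
    simp [pvFree, PySem.Set.mem_ofList]
  have hinner : (fun d => (PySem.List.pyRange 0 grid_h 1).findSome? (fun r =>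
        let rc := d - |head.1 - r|
        if rc < 0 then none
        else ((if rc = 0 then [head.2 - rc] else [head.2 - rc, head.2 + rc]).find?
            (fun c => decide (0 ≤ c ∧ c < grid_w) && !(decide ((r, c) ∈ PySem.Set.ofList snake)))).map
            (fun c => (r, c))))
      = (fun d => ((pvFreeCells snake grid_w grid_h).filter
          (fun p => decide (pvKey head p = d))).head?) := by
    funext d
    rw [pv_ring]
    congr 1
    funext r
    simp only [hocc r]
  rw [hinner]
  exact pv_desc head _ _ _ rfl _
    (fun p hp => (pv_bounds snake head grid_w grid_h p hp).1)
    (fun p hp => (pv_bounds snake head grid_w grid_h p hp).2)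

-- ===== VERDICT (by name: the statement is the Claim_ definition above) =====
theorem find_farthest_point_spec : Claim_equal_find_farthest_point := by
  intro snake grid_w grid_h _ hpre
  unfold Spec_find_farthest_point
  match hh : PySem.List.pyGet? snake 0 with
  | none =>
    unfold find_farthest_point find_farthest_point_alt
    rw [hh]
  | some head =>
    by_cases hwh : grid_w ≤ 0 ∨ grid_h ≤ 0
    · rw [pv_A_eq snake grid_w grid_h head hh]
      unfold find_farthest_point_alt
      rw [hh]
      simp only [if_pos hwh]
      unfold pvFold pvFreeCells
      rw [pv_cells_nil grid_w grid_h hwh]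
      rfl
    · rw [pv_A_eq snake grid_w grid_h head hh, pv_B_eq snake grid_w grid_h head hh hwh]
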